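-- pv_equiv track=rewrite | github.com/egorjke93/network-automatisation | core/constants/interfaces.py | normalize_interface_full
-- ===== SOURCE A (Python) =====
-- from typing import Dict, List
--
-- INTERFACE_FULL_MAP: Dict[str, str] = {
--     "Gi": "GigabitEthernet",
--     "Fa": "FastEthernet",
--     "Te": "TenGigabitEthernet",
--     "TF": "TFGigabitEthernet",  # QTech 10G
--     "Twe": "TwentyFiveGigE",
--     "Fo": "FortyGigabitEthernet",
--     "Hu": "HundredGigE",
--     "Eth": "Ethernet",
--     "Et": "Ethernet",  # Et1/1 → Ethernet1/1
--     "Ag": "AggregatePort",  # QTech LAG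
--     "Po": "Port-channel",
--     "Vl": "Vlan",
--     "Lo": "Loopback",
-- }
--
-- def normalize_interface_full(interface: str) -> str:
--     """
--     Расширяет сокращённое имя интерфейса.
--
--     Gi0/1 -> GigabitEthernet0/1
--
--     Args:
--         interface: Сокращённое имя интерфейса
--
--     Returns:
--         str: Полное имя
--     """
--     # Убираем пробелы между типом и номером (QTech: "TFGigabitEthernet 0/48" → "TFGigabitEthernet0/48")
--     interface = interface.replace(" ", "").strip()
--
--     for short_name, full_name in INTERFACE_FULL_MAP.items():
--         if (
--             interface.startswith(short_name)
--             and not interface.startswith(full_name)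
--             # Убеждаемся что после сокращения идёт цифра (Hu0/55, не HundredGig...)
--             and len(interface) > len(short_name)
--             and interface[len(short_name)].isdigit()
--         ):
--             return interface.replace(short_name, full_name, 1)
--     return interface
-- ===== SOURCE B (Python) =====
-- from typing import Dict
--
-- INTERFACE_FULL_MAP: Dict[str, str] = {
--     "Gi": "GigabitEthernet",
--     "Fa": "FastEthernet",
--     "Te": "TenGigabitEthernet",
--     "TF": "TFGigabitEthernet",
--     "Twe": "TwentyFiveGigE",
--     "Fo": "FortyGigabitEthernet",
--     "Hu": "HundredGigE",
--     "Eth": "Ethernet",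
--     "Et": "Ethernet",
--     "Ag": "AggregatePort",
--     "Po": "Port-channel",
--     "Vl": "Vlan",
--     "Lo": "Loopback",
-- }
--
--
-- def normalize_interface_full(interface: str) -> str:
--     """Expand an abbreviated interface name by parsing off its letter prefix."""
--     s = interface.replace(" ", "").strip()
--     # length of the leading alphabetic run
--     i = 0
--     while i < len(s) and s[i].isalpha():
--         i += 1
--     # convert only when the letter run is exactly a known abbreviation
--     # and is immediately followed by a digit
--     if i < len(s) and s[i].isdigit():
--         full = INTERFACE_FULL_MAP.get(s[:i])
--         if full is not None:
--             return full + s[i:]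
--     return s
-- ===== Notes on version B (the rewrite author's own statement) =====
-- stated objective: idiomatic
-- what changed: B parses the leading alphabetic run once and does a single dict lookup on it, instead of A's ordered scan over all 13 abbreviations with startswith tests against both the short and the full name.
import Mathlib
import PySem

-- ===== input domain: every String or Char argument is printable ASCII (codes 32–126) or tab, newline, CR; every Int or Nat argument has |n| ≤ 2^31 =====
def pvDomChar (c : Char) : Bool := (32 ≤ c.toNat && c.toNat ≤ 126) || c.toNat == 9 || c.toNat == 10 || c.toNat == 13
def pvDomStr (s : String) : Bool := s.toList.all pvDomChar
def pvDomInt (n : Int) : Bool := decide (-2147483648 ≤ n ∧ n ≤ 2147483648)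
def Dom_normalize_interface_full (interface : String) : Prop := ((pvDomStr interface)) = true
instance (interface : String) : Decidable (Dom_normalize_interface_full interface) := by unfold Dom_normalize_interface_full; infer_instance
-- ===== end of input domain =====

-- B replaces A's ordered startswith scan over the abbreviation map by parsing the leading
-- alphabetic run once and doing a single lookup (objective: idiomatic; equal return values).

-- INTERFACE_FULL_MAP, shared module-level constant of both Pythons (insertion order kept)
def pvMap : List (List Char × List Char) :=
  [("Gi".toList, "GigabitEthernet".toList),
   ("Fa".toList, "FastEthernet".toList),
   ("Te".toList, "TenGigabitEthernet".toList),
   ("TF".toList, "TFGigabitEthernet".toList),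
   ("Twe".toList, "TwentyFiveGigE".toList),
   ("Fo".toList, "FortyGigabitEthernet".toList),
   ("Hu".toList, "HundredGigE".toList),
   ("Eth".toList, "Ethernet".toList),
   ("Et".toList, "Ethernet".toList),
   ("Ag".toList, "AggregatePort".toList),
   ("Po".toList, "Port-channel".toList),
   ("Vl".toList, "Vlan".toList),
   ("Lo".toList, "Loopback".toList)]

-- ===== PORT A =====
-- hand port of s.replace(old, new, 1): replace the first occurrence only;
-- exact for old ≠ "" (A only calls it with the nonempty map keys)
def pvReplaceOnce (s old new : List Char) : List Char :=
  let i := PySem.Chars.find s old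
  if i = -1 then s else s.take i.toNat ++ new ++ s.drop (i.toNat + old.length)

-- the for-loop over INTERFACE_FULL_MAP.items(), first matching entry returns
def pvALoop (entries : List (List Char × List Char)) (s : List Char) : List Char :=
  match entries with
  | [] => s
  | (sh, fu) :: rest =>
    if PySem.Chars.startswith s sh && !PySem.Chars.startswith s fu
        && decide (s.length > sh.length)
        && ((PySem.List.pyGet? s (sh.length : Int)).map PySem.Chars.isdigit).getD false
    then pvReplaceOnce s sh fu
    else pvALoop rest s

def normalize_interface_full (interface : String) : String :=
  let s := PySem.Str.strip (PySem.Str.replace interface " " "")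
  String.ofList (pvALoop pvMap s.toList)

-- ===== PORT B =====
-- B's core on the cleaned character list: leading alphabetic run, then one lookup
def pvBCore (l : List Char) : List Char :=
  let p := l.takeWhile PySem.Chars.isalpha
  let r := l.drop p.length
  match r with
  | [] => l
  | c :: _ =>
    if PySem.Chars.isdigit c then
      match List.lookup p pvMap with
      | some f => f ++ r
      | none => l
    else l

def normalize_interface_full_alt (interface : String) : String :=
  let s := PySem.Str.strip (PySem.Str.replace interface " " "")
  String.ofList (pvBCore s.toList)

-- ===== PRECONDITION & SPEC =====
def Spec_normalize_interface_full (interface : String) (out : String) : Prop := out = normalize_interface_full_alt interface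
instance (interface : String) (out : String) : Decidable (Spec_normalize_interface_full interface out) := by unfold Spec_normalize_interface_full; infer_instance

-- ===== CLAIM (what is proved, stated in full; the proofs are below) =====
def Claim_equal_normalize_interface_full : Prop := ∀ (interface : String), Dom_normalize_interface_full interface → Spec_normalize_interface_full interface (normalize_interface_full interface)

-- ===== LEMMAS AND PROOFS =====

-- a digit is not a letter (PySem ASCII classifiers)
theorem pv_digit_not_alpha (c : Char) (h : PySem.Chars.isdigit c = true) :
    PySem.Chars.isalpha c = false := by
  simp [PySem.Chars.isdigit, PySem.Chars.isalpha, PySem.Chars.isupper, PySem.Chars.islower,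
        Bool.and_eq_true, decide_eq_true_eq, Char.le_def, Bool.or_eq_false_iff,
        decide_eq_false_iff_not] at *
  rcases h with ⟨h1, h2⟩
  constructor <;>
    (intro hle
     revert h1 h2 hle
     simp [UInt32.le_iff_toNat_le, UInt32.lt_iff_toNat_lt]
     omega)

-- shape of a good map entry: nonempty all-letter key, full name with a non-digit char at key length
def pvGood (e : List Char × List Char) : Bool :=
  !e.1.isEmpty && e.1.all PySem.Chars.isalpha
    && (match e.2[e.1.length]? with
        | some d => !PySem.Chars.isdigit d
        | none => false)

theorem pv_takeWhile_all_append {p : Char → Bool} (k t : List Char)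
    (hk : ∀ x ∈ k, p x = true) (ht : ∀ c t', t = c :: t' → p c = false) :
    (k ++ t).takeWhile p = k := by
  induction k with
  | nil =>
    cases t with
    | nil => rfl
    | cons c t' => simp [ht c t' rfl]
  | cons a k ih =>
    have ha : p a = true := hk a (by simp)
    simp [ha]
    exact ih (fun x hx => hk x (by simp [hx]))

theorem pv_find_eq_zero (l k : List Char) (h : k <+: l) : PySem.Chars.find l k = 0 := by
  have hinf : k <:+: l := h.isInfix
  have h0 : 0 ≤ PySem.Chars.find l k := (PySem.Chars.find_nonneg_iff l k).2 hinf
  rcases (PySem.Chars.find_spec h0) with ⟨_, hmin⟩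
  by_contra hne
  have hpos : 0 < (PySem.Chars.find l k).toNat := by omega
  exact hmin 0 hpos (by simpa using h)

-- A's loop over any list of good entries equals B's parse-and-lookup
theorem pv_loop_eq (entries : List (List Char × List Char))
    (hg : ∀ e ∈ entries, pvGood e = true) (l : List Char) :
    pvALoop entries l =
      (match l.drop (l.takeWhile PySem.Chars.isalpha).length with
       | [] => l
       | c :: _ =>
         if PySem.Chars.isdigit c then
           match List.lookup (l.takeWhile PySem.Chars.isalpha) entries with
           | some f => f ++ l.drop (l.takeWhile PySem.Chars.isalpha).length
           | none => l
         else l) := by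
  induction entries with
  | nil =>
    simp only [pvALoop, List.lookup]
    cases h : l.drop (l.takeWhile PySem.Chars.isalpha).length with
    | nil => rfl
    | cons c t => by_cases hd : PySem.Chars.isdigit c = true <;> simp [hd]
  | cons e rest ih =>
    obtain ⟨sh, fu⟩ := e
    have hge : pvGood (sh, fu) = true := hg _ (by simp)
    have hrest : ∀ e ∈ rest, pvGood e = true := fun e he => hg e (by simp [he])
    have hk_ne : sh ≠ [] := by
      simp [pvGood] at hge; rcases hge with ⟨⟨h1, _⟩, _⟩
      simpa [List.isEmpty_iff] using h1
    have hk_alpha : ∀ x ∈ sh, PySem.Chars.isalpha x = true := by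
      simp [pvGood] at hge; rcases hge with ⟨⟨_, h2⟩, _⟩
      simpa [List.all_eq_true] using h2
    obtain ⟨d, hfd, hdnd⟩ : ∃ d, fu[sh.length]? = some d ∧ PySem.Chars.isdigit d = false := by
      simp [pvGood] at hge; rcases hge with ⟨_, h3⟩
      cases hx : fu[sh.length]? with
      | none => rw [hx] at h3; simp at h3
      | some d => rw [hx] at h3; exact ⟨d, rfl, by simpa using h3⟩
    by_cases hguard : (PySem.Chars.startswith l sh && !PySem.Chars.startswith l fu
        && decide (l.length > sh.length)
        && ((PySem.List.pyGet? l (sh.length : Int)).map PySem.Chars.isdigit).getD false) = true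
    · -- the entry fires: sh is the alphabetic prefix of l, followed by a digit
      have hguard' := hguard
      simp only [Bool.and_eq_true, Bool.not_eq_true'] at hguard'
      obtain ⟨⟨⟨hsw, _⟩, _⟩, hdig⟩ := hguard'
      have hpre : sh <+: l := (PySem.Chars.startswith_iff l sh).1 hsw
      obtain ⟨t, ht⟩ := hpre
      have hget : PySem.List.pyGet? l (sh.length : Int) = t[0]? := by
        rw [PySem.List.pyGet?_natCast, ← ht]
        simp [List.getElem?_append_right]
      obtain ⟨c, t', htc⟩ : ∃ c t', t = c :: t' := by
        cases t with
        | nil => rw [hget] at hdig; simp at hdig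
        | cons c t' => exact ⟨c, t', rfl⟩
      have hcd : PySem.Chars.isdigit c = true := by
        rw [hget, htc] at hdig; simpa using hdig
      have hTW : l.takeWhile PySem.Chars.isalpha = sh := by
        rw [← ht]
        exact pv_takeWhile_all_append sh t hk_alpha
          (fun c0 t0 h0 => by
            rw [htc] at h0; cases h0
            exact pv_digit_not_alpha c hcd ▸ rfl)
      have hdrop : l.drop sh.length = t := by rw [← ht]; simp
      have hfind : PySem.Chars.find l sh = 0 := pv_find_eq_zero l sh ((PySem.Chars.startswith_iff l sh).1 hsw)
      simp only [pvALoop]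
      rw [if_pos hguard, hTW, hdrop, htc]
      simp only [List.lookup, BEq.rfl, hcd, if_true]
      rw [pvReplaceOnce, hfind]
      simp [← ht, htc]
    · -- the entry does not fire: the alphabetic prefix cannot be sh in the converting case
      simp only [pvALoop]
      rw [if_neg (by simpa using hguard)]
      rw [ih hrest]
      cases hdropEq : l.drop (l.takeWhile PySem.Chars.isalpha).length with
      | nil => rfl
      | cons c t =>
        by_cases hcd : PySem.Chars.isdigit c = true
        · have hne : l.takeWhile PySem.Chars.isalpha ≠ sh := by
            intro hTW
            apply hguard
            have hpre : sh <+: l := hTW ▸ List.takeWhile_prefix _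
            obtain ⟨t0, ht0⟩ := hpre
            have hdropt : l.drop sh.length = t0 := by rw [← ht0]; simp
            have htc : t0 = c :: t := by rw [← hdropt, ← hTW]; exact hdropEq
            have hget : PySem.List.pyGet? l (sh.length : Int) = some c := by
              rw [PySem.List.pyGet?_natCast, ← ht0]
              simp [htc]
            have hlen : l.length > sh.length := by
              rw [← ht0, htc]; simp
            have hnfu : PySem.Chars.startswith l fu = false := by
              rw [Bool.eq_false_iff]
              intro hswfu
              obtain ⟨t1, ht1⟩ := (PySem.Chars.startswith_iff l fu).1 hswfu
              have hflen : sh.length < fu.length := by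
                by_contra hge'
                rw [List.getElem?_eq_none_iff.2 (by omega)] at hfd; cases hfd
              have : l[sh.length]? = some d := by
                rw [← ht1, List.getElem?_append_left hflen, hfd]
              rw [PySem.List.pyGet?_natCast] at hget
              rw [hget] at this
              injection this with hcd2
              rw [← hcd2, hcd] at hdnd
              exact Bool.noConfusion hdnd
            rw [(PySem.Chars.startswith_iff l sh).2 ⟨t0, ht0⟩, hnfu, hget]
            simp [hcd, hlen]
          simp [List.lookup, hcd, beq_eq_decide, hne]
        · simp [hcd]

theorem pv_core_eq (l : List Char) : pvALoop pvMap l = pvBCore l := by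
  rw [pvBCore, pv_loop_eq pvMap (by decide) l]

-- ===== VERDICT (by name: the statement is the Claim_ definition above) =====
theorem normalize_interface_full_spec : Claim_equal_normalize_interface_full := by
  intro interface _
  unfold Spec_normalize_interface_full normalize_interface_full normalize_interface_full_alt
  exact congrArg String.ofList (pv_core_eq _)
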